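-- pv_equiv track=rewrite | github.com/eastonYi/end-to-end_asr_pytorch | src/utils/utils.py | ids2str
-- ===== SOURCE A (Python) =====
-- def ids2str(hyps_ints, idx2token):
--     list_res = []
--     hyp = ''
--     for hyp_ints, length in zip(*hyps_ints):
--         for idx in hyp_ints[:length]:
--             hyp += idx2token[idx]
--         list_res.append(hyp)
--
--     return list_res
-- ===== SOURCE B (Python) =====
-- def ids2str(hyps_ints, idx2token):
--     # two-pass: per-sequence token strings first, then join prefixes
--     strs = [''.join(idx2token[idx] for idx in h[:l]) for h, l in zip(*hyps_ints)]
--     return [''.join(strs[:i + 1]) for i in range(len(strs))]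
-- ===== Notes on version B (the rewrite author's own statement) =====
-- stated objective: alternative
-- what changed: Replaces A's single threaded never-reset string accumulator with a two-pass decomposition: first a list of each sequence's own token string, then the cumulative outputs as joins of the prefixes of that list.
import Mathlib
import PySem

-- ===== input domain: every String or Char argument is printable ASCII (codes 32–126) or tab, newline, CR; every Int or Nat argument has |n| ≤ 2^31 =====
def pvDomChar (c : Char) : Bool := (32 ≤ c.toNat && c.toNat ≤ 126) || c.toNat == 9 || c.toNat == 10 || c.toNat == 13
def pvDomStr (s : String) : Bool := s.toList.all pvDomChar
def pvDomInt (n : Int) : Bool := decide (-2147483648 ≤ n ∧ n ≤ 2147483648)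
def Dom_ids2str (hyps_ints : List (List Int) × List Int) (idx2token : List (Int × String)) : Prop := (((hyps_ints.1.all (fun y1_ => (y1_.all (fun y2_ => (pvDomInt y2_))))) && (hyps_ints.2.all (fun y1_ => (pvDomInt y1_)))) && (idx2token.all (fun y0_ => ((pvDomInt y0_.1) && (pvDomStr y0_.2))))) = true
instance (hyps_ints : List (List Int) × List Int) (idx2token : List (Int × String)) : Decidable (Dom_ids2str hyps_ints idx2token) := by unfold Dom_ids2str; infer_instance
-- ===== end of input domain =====

-- B replaces A's single never-reset accumulator loop with a two-pass decomposition
-- (per-sequence strings, then prefix joins); same cost, clearer structure (objective: alternative).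

-- dict lookup idx2token[idx] (first match); both programs perform the same lookup
def pvTok (idx2token : List (Int × String)) (idx : Int) : String :=
  (idx2token.lookup idx).getD ""

-- ===== PORT A =====
def ids2str (hyps_ints : List (List Int) × List Int) (idx2token : List (Int × String)) : List String :=
  ((List.zip hyps_ints.1 hyps_ints.2).foldl
    (fun (st : List String × String) p =>
      let hyp := (PySem.List.slice p.1 none (some p.2)).foldl
        (fun s idx => s ++ pvTok idx2token idx) st.2
      (st.1 ++ [hyp], hyp))
    ([], "")).1

-- ===== PORT B =====
def ids2str_alt (hyps_ints : List (List Int) × List Int) (idx2token : List (Int × String)) : List String :=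
  let strs := (List.zip hyps_ints.1 hyps_ints.2).map
    (fun p => PySem.Str.join "" ((PySem.List.slice p.1 none (some p.2)).map (pvTok idx2token)))
  (PySem.List.pyRange 0 strs.length 1).map
    (fun i => PySem.Str.join "" (PySem.List.slice strs none (some (i + 1))))

-- ===== PRECONDITION & SPEC =====
-- A raises KeyError when a used token id is missing from idx2token; Pre_ excludes exactly that.
def Pre_ids2str (hyps_ints : List (List Int) × List Int) (idx2token : List (Int × String)) : Prop :=
  ∀ p ∈ List.zip hyps_ints.1 hyps_ints.2,
    ∀ idx ∈ PySem.List.slice p.1 none (some p.2), (idx2token.lookup idx).isSome = true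
instance (hyps_ints : List (List Int) × List Int) (idx2token : List (Int × String)) : Decidable (Pre_ids2str hyps_ints idx2token) := by unfold Pre_ids2str; infer_instance

def pvWitness_ids2str : (List (List Int) × List Int) × (List (Int × String)) :=
  (([[0, 1], [1]], [2, 1]), [(0, "a"), (1, "b")])

def Spec_ids2str (hyps_ints : List (List Int) × List Int) (idx2token : List (Int × String)) (out : List String) : Prop := out = ids2str_alt hyps_ints idx2token
instance (hyps_ints : List (List Int) × List Int) (idx2token : List (Int × String)) (out : List String) : Decidable (Spec_ids2str hyps_ints idx2token out) := by unfold Spec_ids2str; infer_instance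

-- ===== CLAIM (what is proved, stated in full; the proofs are below) =====
def Claim_equal_ids2str : Prop := ∀ (hyps_ints : List (List Int) × List Int) (idx2token : List (Int × String)), Dom_ids2str hyps_ints idx2token → Pre_ids2str hyps_ints idx2token → Spec_ids2str hyps_ints idx2token (ids2str hyps_ints idx2token)

-- ===== LEMMAS AND PROOFS =====

-- prefix accumulation: the list of running concatenations starting from acc
def pacc (acc : String) : List String → List String
  | [] => []
  | s :: r => (acc ++ s) :: pacc (acc ++ s) r

theorem join0_nil : PySem.Str.join "" [] = "" := rfl

theorem join0_cons (s : String) (r : List String) :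
    PySem.Str.join "" (s :: r) = s ++ PySem.Str.join "" r := by
  apply String.toList_inj.mp
  cases r with
  | nil => simp [PySem.Str.toList_join, PySem.Chars.join, List.intercalate]
  | cons b t => simp [PySem.Str.toList_join, PySem.Chars.join_cons_cons]

theorem foldl_append_join (t : Int → String) :
    ∀ (xs : List Int) (acc : String),
      xs.foldl (fun s i => s ++ t i) acc = acc ++ PySem.Str.join "" (xs.map t) := by
  intro xs
  induction xs with
  | nil => intro acc; simp [join0_nil]
  | cons x xs ih =>
    intro acc
    simp only [List.foldl_cons, List.map_cons, join0_cons, ih, String.append_assoc]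

theorem A_fold (g : List Int × Int → String)
    (f : List String × String → List Int × Int → List String × String)
    (hf : ∀ st p, f st p = (st.1 ++ [st.2 ++ g p], st.2 ++ g p)) :
    ∀ (l : List (List Int × Int)) (res : List String) (acc : String),
      l.foldl f (res, acc) = (res ++ pacc acc (l.map g),
        (l.map g).foldl (· ++ ·) acc) := by
  intro l
  induction l with
  | nil => intro res acc; simp [pacc]
  | cons p l ih =>
    intro res acc
    simp only [List.foldl_cons, List.map_cons, hf, pacc, ih]
    simp

theorem B_prefix :
    ∀ (strs : List String) (acc : String),
      (List.range strs.length).map (fun i => acc ++ PySem.Str.join "" (strs.take (i + 1)))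
        = pacc acc strs := by
  intro strs
  induction strs with
  | nil => intro acc; simp [pacc]
  | cons s r ih =>
    intro acc
    simp only [List.length_cons, List.range_succ_eq_map, List.map_cons, List.map_map, pacc]
    congr 1
    · simp [join0_cons, join0_nil]
    · rw [← ih (acc ++ s)]
      apply List.map_congr_left
      intro k _
      simp only [Function.comp]
      rw [List.take_succ_cons, join0_cons, String.append_assoc]

theorem B_eq (strs : List String) :
    (PySem.List.pyRange 0 strs.length 1).map
      (fun i => PySem.Str.join "" (PySem.List.slice strs none (some (i + 1))))
      = pacc "" strs := by
  rw [PySem.List.pyRange_one, List.map_map, ← B_prefix strs ""]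
  have hlen : (((strs.length : Int) - 0).toNat) = strs.length := by omega
  rw [hlen]
  apply List.map_congr_left
  intro k hk
  simp only [Function.comp, zero_add]
  have hcast : ((k : Int) + 1) = ((k + 1 : Nat) : Int) := by push_cast; ring
  rw [hcast, PySem.List.slice_to_natCast]
  simp

-- ===== VERDICT (by name: the statement is the Claim_ definition above) =====
theorem ids2str_spec : Claim_equal_ids2str := by
  intro hyps_ints idx2token _ _
  unfold Spec_ids2str ids2str ids2str_alt
  rw [A_fold (fun p => PySem.Str.join "" ((PySem.List.slice p.1 none (some p.2)).map (pvTok idx2token)))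
      _ (fun st p => by simp only [foldl_append_join]) _ [] ""]
  rw [B_eq]
  simp
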